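-- pv_equiv track=rewrite | github.com/dthinkcs/problemSolving | recurrence/seenAB.py | fn
-- ===== SOURCE A (Python) =====
-- def fn(nums):
--     seen = set()
--     for i in range(len(nums)):
--         for j in range(i + 1, len(nums)):
--             tot = nums[i] + nums[j]
--
--             if tot in seen:
--                 return True
--
--             seen.add(tot)
--
--     return False
-- ===== SOURCE B (Python) =====
-- def fn(nums):
--     n = len(nums)
--     sums = [nums[i] + nums[j] for i in range(n) for j in range(i + 1, n)]
--     srt = sorted(sums)
--     for a, b in zip(srt, srt[1:]):
--         if a == b:
--             return True
--     return False
-- ===== Notes on version B (the rewrite author's own statement) =====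
-- stated objective: alternative
-- what changed: Replaces the incremental hash-set with early exit by materializing all pairwise sums, sorting them, and scanning adjacent pairs for a duplicate.
import Mathlib
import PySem

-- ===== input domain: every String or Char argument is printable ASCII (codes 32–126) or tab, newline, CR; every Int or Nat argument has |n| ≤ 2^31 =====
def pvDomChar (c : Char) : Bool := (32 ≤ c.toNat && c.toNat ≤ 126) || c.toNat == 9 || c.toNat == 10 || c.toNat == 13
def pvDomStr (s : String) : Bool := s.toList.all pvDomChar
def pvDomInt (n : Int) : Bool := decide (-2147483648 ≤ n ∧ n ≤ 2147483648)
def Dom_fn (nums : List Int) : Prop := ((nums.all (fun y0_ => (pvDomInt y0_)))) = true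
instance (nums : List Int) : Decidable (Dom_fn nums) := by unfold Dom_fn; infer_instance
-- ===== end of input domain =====

-- B replaces A's incremental seen-set with early exit by materialize-all-pairwise-sums,
-- sort, and scan adjacent pairs for a duplicate (alternative decomposition, same result).

-- ===== PORT A =====
-- A-side helper: body of the inner loop — the 'tot in seen' check, with the early-return
-- flag carried in the first component (once true it absorbs, as Python's return does).
def fnStep (st : Bool × PySem.Set Int) (tot : Int) : Bool × PySem.Set Int :=
  if st.1 then st
  else if PySem.Set.contains st.2 tot then (true, st.2)
  else (st.1, PySem.Set.add st.2 tot)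

-- indices produced by range(len(nums)) are always in range, so pyGetD's default 0 is never used (exact)
def fn (nums : List Int) : Bool :=
  (List.foldl
    (fun st i =>
      List.foldl
        (fun st j => fnStep st (PySem.List.pyGetD nums i 0 + PySem.List.pyGetD nums j 0))
        st (PySem.List.pyRange (i + 1) (nums.length : Int) 1))
    (false, PySem.Set.empty)
    (PySem.List.pyRange 0 (nums.length : Int) 1)).1

-- ===== PORT B =====
def fn_alt (nums : List Int) : Bool :=
  let n : Int := (nums.length : Int)
  let sums := (PySem.List.pyRange 0 n 1).flatMap (fun i =>
      (PySem.List.pyRange (i + 1) n 1).map (fun j =>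
        PySem.List.pyGetD nums i 0 + PySem.List.pyGetD nums j 0))
  let srt := PySem.List.sorted sums (fun x => x) false
  (srt.zip (PySem.List.slice srt (some 1) none)).any (fun p => p.1 == p.2)

-- ===== PRECONDITION & SPEC =====
def Spec_fn (nums : List Int) (out : Bool) : Prop := out = fn_alt nums
instance (nums : List Int) (out : Bool) : Decidable (Spec_fn nums out) := by unfold Spec_fn; infer_instance

-- ===== CLAIM (what is proved, stated in full; the proofs are below) =====
def Claim_equal_fn : Prop := ∀ (nums : List Int), Dom_fn nums → Spec_fn nums (fn nums)

-- ===== LEMMAS AND PROOFS =====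

-- the list of all pairwise sums nums[i]+nums[j], i<j, in A's (and B's) traversal order
def pvSums (nums : List Int) : List Int :=
  (PySem.List.pyRange 0 (nums.length : Int) 1).flatMap (fun i =>
    (PySem.List.pyRange (i + 1) (nums.length : Int) 1).map (fun j =>
      PySem.List.pyGetD nums i 0 + PySem.List.pyGetD nums j 0))

lemma foldl_pairs {σ : Type} (l : List Int) (r : Int → List Int) (f : Int → Int → Int)
    (g : σ → Int → σ) (s : σ) :
    l.foldl (fun st i => (r i).foldl (fun st j => g st (f i j)) st) s
      = (l.flatMap (fun i => (r i).map (f i))).foldl g s := by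
  induction l generalizing s with
  | nil => rfl
  | cons a t ih => simp [List.foldl_append, List.foldl_map, ih]

lemma scan_absorb (L : List Int) (s : PySem.Set Int) :
    List.foldl fnStep (true, s) L = (true, s) := by
  induction L with
  | nil => rfl
  | cons x t ih => simpa [fnStep] using ih

lemma scan_spec (L : List Int) (s : PySem.Set Int) (hs : s.Nodup) :
    (List.foldl fnStep (false, s) L).1 = !decide ((s ++ L).Nodup) := by
  induction L generalizing s with
  | nil => simp [hs]
  | cons x t ih =>
    by_cases hx : x ∈ s
    · have hnd : ¬ (s ++ x :: t).Nodup := by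
        intro h
        rcases List.nodup_append.1 h with ⟨_, _, hdisj⟩
        exact hdisj x hx x (by simp) rfl
      have hstep : fnStep (false, s) x = (true, s) := by simp [fnStep, hx]
      simp only [List.foldl_cons]
      rw [hstep, scan_absorb]
      simp [hnd]
    · have hnd : (s ++ [x]).Nodup := by
        simp only [List.nodup_append, hs, List.nodup_cons, List.not_mem_nil,
          not_false_iff, List.nodup_nil, and_true, true_and]
        intro a ha b hb
        simp only [List.mem_singleton] at hb
        subst hb
        exact fun h => hx (h ▸ ha)
      have hstep : fnStep (false, s) x = (false, s ++ [x]) := by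
        simp [fnStep, hx]
      simp only [List.foldl_cons]
      rw [hstep, ih _ hnd, List.append_assoc]
      simp

lemma fn_eq_dup (nums : List Int) : fn nums = !decide ((pvSums nums).Nodup) := by
  unfold fn pvSums
  rw [foldl_pairs]
  rw [scan_spec _ PySem.Set.empty List.nodup_nil]
  simp [PySem.Set.empty]

lemma adj_dup (L : List Int) (hL : L.Pairwise (· ≤ ·)) :
    (L.zip L.tail).any (fun p => p.1 == p.2) = !decide L.Nodup := by
  induction L with
  | nil => simp
  | cons a t ih =>
    cases t with
    | nil => simp
    | cons b t' =>
      have htail : (b :: t').Pairwise (· ≤ ·) := hL.of_cons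
      by_cases hab : a = b
      · subst hab
        simp
      · have hale : ∀ x ∈ b :: t', a ≤ x := by
          intro x hx
          exact (List.pairwise_cons.1 hL).1 x hx
        have hnot : a ∉ b :: t' := by
          intro hmem
          rcases List.mem_cons.1 hmem with h | h
          · exact hab h
          · have hbx : b ≤ a := (List.pairwise_cons.1 htail).1 a h
            have hax : a ≤ b := hale b (by simp)
            exact hab (le_antisymm hax hbx)
        have : ((b :: t').zip (b :: t').tail).any (fun p => p.1 == p.2)
            = !decide (b :: t').Nodup := ih htail
        simp only [List.tail_cons, List.zip_cons_cons, List.any_cons] at this ⊢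
        simp [hab, this, List.nodup_cons, hnot]

lemma fn_alt_eq_dup (nums : List Int) : fn_alt nums = !decide ((pvSums nums).Nodup) := by
  have hrfl : fn_alt nums =
      ((PySem.List.sorted (pvSums nums) (fun x => x) false).zip
        (PySem.List.slice (PySem.List.sorted (pvSums nums) (fun x => x) false) (some 1) none)).any
        (fun p => p.1 == p.2) := rfl
  rw [hrfl]
  rw [PySem.List.slice_from_one]
  have hpw : (PySem.List.sorted (pvSums nums) (fun x => x) false).Pairwise (· ≤ ·) := by
    simpa using PySem.List.sorted_pairwise (pvSums nums) (fun x => x)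
  rw [adj_dup _ hpw]
  have hperm : (PySem.List.sorted (pvSums nums) (fun x => x) false).Perm (pvSums nums) :=
    PySem.List.sorted_perm _ _ _
  simp [hperm.nodup_iff]

-- ===== VERDICT (by name: the statement is the Claim_ definition above) =====
theorem fn_spec : Claim_equal_fn := by
  intro nums _
  unfold Spec_fn
  rw [fn_eq_dup, fn_alt_eq_dup]
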